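-- pv_equiv track=rewrite | github.com/charlesfranciscodev/codingame | clash-of-code/shortest/unreachable-rooms/unreachable_rooms.py | find_unreachable_rooms
-- ===== SOURCE A (Python) =====
-- from collections import deque
--
-- def find_unreachable_rooms(n, keys):
--     graph = {i: set(keys[i]) for i in range(n)}
--     visited = set([0])
--     queue = deque([0])
--
--     while queue:
--         room = queue.popleft()
--         for key in graph[room]:
--             if key not in visited:
--                 visited.add(key)
--                 queue.append(key)
--
--     unreachable_rooms = n - len(visited)
--     return unreachable_rooms
-- ===== SOURCE B (Python) =====
-- def find_unreachable_rooms(n, keys):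
--     # Fixed-point saturation over a boolean table: no deque, no visited set.
--     # Build the adjacency list, then repeatedly sweep all rooms, propagating
--     # reachability along edges, until a full sweep changes nothing; finally
--     # count the unmarked rooms.
--     graph = [keys[i] for i in range(n)]
--     reachable = [False] * n
--     reachable[0] = True
--     changed = True
--     while changed:
--         changed = False
--         for room in range(n):
--             if reachable[room]:
--                 for k in graph[room]:
--                     if not reachable[k]:
--                         reachable[k] = True
--                         changed = True
--     return n - sum(reachable)
-- ===== Notes on version B (the rewrite author's own statement) =====
-- stated objective: alternative
-- what changed: Replaces A's BFS (adjacency dict + deque + visited set) by fixed-point saturation over a boolean table: after building the adjacency list, repeated full sweeps propagate reachability until a sweep changes nothing, with no queue or set at all.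
-- outside the precondition, e.g. on find_unreachable_rooms(2, [[0], [5]]): A returns 1, B returns 1
import Mathlib
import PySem

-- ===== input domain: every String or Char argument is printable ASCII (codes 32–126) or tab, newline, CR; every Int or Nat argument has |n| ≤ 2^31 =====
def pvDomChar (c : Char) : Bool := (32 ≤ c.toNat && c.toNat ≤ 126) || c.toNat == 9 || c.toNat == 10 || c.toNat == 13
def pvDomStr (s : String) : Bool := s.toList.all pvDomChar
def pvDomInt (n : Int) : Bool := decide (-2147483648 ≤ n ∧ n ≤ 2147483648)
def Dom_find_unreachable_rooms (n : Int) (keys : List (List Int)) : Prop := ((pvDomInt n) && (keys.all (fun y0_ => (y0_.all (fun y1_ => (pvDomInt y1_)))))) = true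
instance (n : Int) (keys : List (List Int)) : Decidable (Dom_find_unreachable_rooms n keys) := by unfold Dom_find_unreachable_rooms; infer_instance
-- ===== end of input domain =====

-- B replaces A's BFS (adjacency dict + deque + visited set) by fixed-point
-- saturation over a boolean table — repeated full sweeps until no change
-- (objective: alternative; not claimed faster).

-- ===== PORT A =====
-- the 'while queue' loop of A; fuel bounds the number of iterations (n.toNat is
-- proved sufficient on Pre_); graph[room] (KeyError when absent) is ported as
-- get? … |>.getD [] — exact on Pre_, where every popped room is a key of graph
def pvBfsLoop (graph : PySem.Dict Int (PySem.Set Int)) : Nat → PySem.Set Int → List Int → PySem.Set Int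
  | 0, visited, _ => visited
  | _+1, visited, [] => visited
  | fuel+1, visited, room :: queue =>
      let st := ((graph.get? room).getD []).foldl
        (fun (p : PySem.Set Int × List Int) key =>
          if key ∈ p.1 then p else (PySem.Set.add p.1 key, p.2 ++ [key]))
        (visited, queue)
      pvBfsLoop graph fuel st.1 st.2

def find_unreachable_rooms (n : Int) (keys : List (List Int)) : Int :=
  -- graph = {i: set(keys[i]) for i in range(n)}; keys[i] (IndexError) as pyGet? … |>.getD [] — exact on Pre_
  let graph : PySem.Dict Int (PySem.Set Int) :=
    (PySem.List.pyRange 0 n 1).foldl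
      (fun d i => d.insert i (PySem.Set.ofList ((PySem.List.pyGet? keys i).getD []))) PySem.Dict.empty
  let visited := pvBfsLoop graph n.toNat (PySem.Set.ofList [0]) [0]
  n - (visited.length : Int)

-- ===== PORT B =====
-- body of 'for k in keys[room]': reachable[k] read/write via pyGetD/pySetD
-- (total forms; exact on Pre_, where every key is an in-range index)
def pvInnerStep : List Bool × Bool → Int → List Bool × Bool :=
  fun st k =>
    if PySem.List.pyGetD st.1 k false then st
    else (PySem.List.pySetD st.1 k true, true)

-- body of 'for room in range(n)'; graph[room] read via pyGetD (total form;
-- exact here: room is always an in-range index of graph)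
def pvSweepStep (graph : List (List Int)) : List Bool × Bool → Int → List Bool × Bool :=
  fun st room =>
    if PySem.List.pyGetD st.1 room false then
      (PySem.List.pyGetD graph room []).foldl pvInnerStep st
    else st

-- 'while changed': fuel bounds the number of sweeps (n.toNat is proved
-- sufficient on Pre_: every re-sweep strictly grows the marked count ≤ n)
def pvSaturate (n : Int) (graph : List (List Int)) : Nat → List Bool → List Bool
  | 0, reachable => reachable
  | fuel+1, reachable =>
      let st := (PySem.List.pyRange 0 n 1).foldl (pvSweepStep graph) (reachable, false)
      if st.2 then pvSaturate n graph fuel st.1 else st.1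

def find_unreachable_rooms_alt (n : Int) (keys : List (List Int)) : Int :=
  -- graph = [keys[i] for i in range(n)]; keys[i] (IndexError) as pyGet? … |>.getD [] — exact on Pre_;
  -- reachable = [False] * n; reachable[0] = True (pySetD: exact on Pre_, where 1 ≤ n);
  -- sum(reachable) counts the True entries
  let graph : List (List Int) :=
    (PySem.List.pyRange 0 n 1).map (fun i => (PySem.List.pyGet? keys i).getD [])
  let reachable := PySem.List.pySetD (List.replicate n.toNat false) 0 true
  let final := pvSaturate n graph n.toNat reachable
  n - ((final.count true : Nat) : Int)

-- ===== PRECONDITION & SPEC =====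
-- Pre_ excludes the inputs on which A raises: n < 1 or n > len(keys) (KeyError on
-- room 0 / IndexError building graph) and inputs with an out-of-range key, on which
-- A raises KeyError as soon as such a key is reached.  This is slightly narrower
-- than A's acceptance: when every out-of-range key sits in a room unreachable from 0,
-- A still returns (and B returns the same value); reachability is not a closed-form
-- condition, so Pre_ excludes all out-of-range keys.
def Pre_find_unreachable_rooms (n : Int) (keys : List (List Int)) : Prop :=
  1 ≤ n ∧ n ≤ keys.length ∧ ∀ l ∈ keys.take n.toNat, ∀ k ∈ l, 0 ≤ k ∧ k < n
instance (n : Int) (keys : List (List Int)) : Decidable (Pre_find_unreachable_rooms n keys) := by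
  unfold Pre_find_unreachable_rooms; infer_instance

def pvWitness_find_unreachable_rooms : Int × List (List Int) := (3, [[1], [], [1]])

def Spec_find_unreachable_rooms (n : Int) (keys : List (List Int)) (out : Int) : Prop := out = find_unreachable_rooms_alt n keys
instance (n : Int) (keys : List (List Int)) (out : Int) : Decidable (Spec_find_unreachable_rooms n keys out) := by unfold Spec_find_unreachable_rooms; infer_instance

-- ===== CLAIM (what is proved, stated in full; the proofs are below) =====
def Claim_equal_find_unreachable_rooms : Prop := ∀ (n : Int) (keys : List (List Int)), Dom_find_unreachable_rooms n keys → Pre_find_unreachable_rooms n keys → Spec_find_unreachable_rooms n keys (find_unreachable_rooms n keys)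

-- ===== LEMMAS AND PROOFS =====

-- neighbours of room v, as both Pythons read them: keys[v]
def pvF (keys : List (List Int)) (v : Int) : List Int :=
  (PySem.List.pyGet? keys v).getD []

-- the rooms reachable from room 0 along key edges
inductive PvReach (keys : List (List Int)) : Int → Prop
  | zero : PvReach keys 0
  | step (r k : Int) : PvReach keys r → k ∈ pvF keys r → PvReach keys k

-- on Pre_, neighbours of an in-range room are in range
lemma pvF_range (n : Int) (keys : List (List Int))
    (hpre : Pre_find_unreachable_rooms n keys) :
    ∀ v : Int, 0 ≤ v → v < n → ∀ k ∈ pvF keys v, 0 ≤ k ∧ k < n := by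
  obtain ⟨hn, hlen, hk⟩ := hpre
  intro v h0 h1 k hkm
  have hv : v = ((v.toNat : Nat) : Int) := by omega
  have hlt : v.toNat < keys.length := by omega
  have : pvF keys v = keys[v.toNat] := by
    conv_lhs => rw [pvF, hv]
    rw [PySem.List.pyGet?_natCast, List.getElem?_eq_getElem hlt]
    rfl
  rw [this] at hkm
  have htake : v.toNat < n.toNat := by omega
  have hmem : keys[v.toNat] ∈ keys.take n.toNat := by
    have hlen' : v.toNat < (keys.take n.toNat).length := by
      simp [List.length_take]; omega
    have : (keys.take n.toNat)[v.toNat] = keys[v.toNat] := List.getElem_take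
    exact this ▸ List.getElem_mem hlen'
  exact hk _ hmem k hkm

-- on Pre_, every reachable room is in range
lemma pvReach_range (n : Int) (keys : List (List Int)) (h1n : 1 ≤ n)
    (hnb : ∀ v : Int, 0 ≤ v → v < n → ∀ k ∈ pvF keys v, 0 ≤ k ∧ k < n) :
    ∀ x, PvReach keys x → 0 ≤ x ∧ x < n := by
  intro x hx
  induction hx with
  | zero => omega
  | step r k _ hk ih => exact hnb r ih.1 ih.2 k hk

-- any set containing 0 and closed under pvF contains every reachable room
lemma pvReach_subset (keys : List (List Int)) (S : List Int)
    (h0 : (0:Int) ∈ S) (hcl : ∀ v ∈ S, ∀ k ∈ pvF keys v, k ∈ S) :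
    ∀ v, PvReach keys v → v ∈ S := by
  intro v hv
  induction hv with
  | zero => exact h0
  | step r k _ hk ih => exact hcl r ih k hk

-- a duplicate-free list of integers in [0, n) has at most n.toNat elements
lemma pvLen_le (n : Int) (S : List Int) (hnd : S.Nodup)
    (hr : ∀ v ∈ S, 0 ≤ v ∧ v < n) : S.length ≤ n.toNat := by
  have hsub : S.toFinset ⊆ Finset.Ico (0:Int) n := by
    intro x hx
    rw [List.mem_toFinset] at hx
    exact Finset.mem_Ico.mpr (by exact ⟨(hr x hx).1, (hr x hx).2⟩)
  have := Finset.card_le_card hsub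
  rw [List.toFinset_card_of_nodup hnd, Int.card_Ico] at this
  omega

-- ---- A side ----

-- lookup in a dict built by A's range-n insertion fold
lemma pvGraph_get {ν : Type} (f : Int → ν) :
    ∀ (m : Nat) (d : PySem.Dict Int ν) (v : Int),
      ((List.map (Nat.cast : Nat → Int) (List.range m)).foldl
        (fun d i => d.insert i (f i)) d).get? v
      = if 0 ≤ v ∧ v < (m:Int) then some (f v) else d.get? v := by
  intro m
  induction m with
  | zero =>
    intro d v
    rw [if_neg (by push_cast; omega)]
    simp
  | succ m ih =>
    intro d v
    rw [List.range_succ, List.map_append, List.foldl_append]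
    simp only [List.map_cons, List.map_nil, List.foldl_cons, List.foldl_nil]
    by_cases hv : v = (m:Int)
    · subst hv
      rw [PySem.Dict.get?_insert_self, if_pos (by push_cast; omega)]
    · rw [PySem.Dict.get?_insert_of_ne _ _ hv, ih d v]
      by_cases hc : 0 ≤ v ∧ v < (m:Int)
      · rw [if_pos hc, if_pos (by push_cast at hc ⊢; omega)]
      · rw [if_neg hc, if_neg (by push_cast at hc ⊢; omega)]

-- the inner 'for key in graph[room]' fold of A (named so the lemma can speak about it)
def pvStep : PySem.Set Int × List Int → Int → PySem.Set Int × List Int :=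
  fun p key => if key ∈ p.1 then p else (PySem.Set.add p.1 key, p.2 ++ [key])

lemma pvInner (L : List Int) :
    ∀ (v : PySem.Set Int) (q : List Int), v.Nodup →
    (L.foldl pvStep (v, q)).1.Nodup ∧
    (∀ x, x ∈ (L.foldl pvStep (v, q)).1 ↔ x ∈ v ∨ x ∈ L) ∧
    (∀ x ∈ (L.foldl pvStep (v, q)).2, x ∈ q ∨ x ∈ L) ∧
    (q <+: (L.foldl pvStep (v, q)).2) ∧
    (∀ x ∈ L, x ∉ v → x ∈ (L.foldl pvStep (v, q)).2) ∧
    (L.foldl pvStep (v, q)).1.length + q.length = v.length + (L.foldl pvStep (v, q)).2.length := by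
  induction L with
  | nil =>
    intro v q hnd
    refine ⟨hnd, ?_, ?_, List.prefix_refl _, ?_, rfl⟩ <;> simp
  | cons key L ih =>
    intro v q hnd
    by_cases hmem : key ∈ v
    · have hstep : pvStep (v, q) key = (v, q) := by simp [pvStep, hmem]
      rw [List.foldl_cons, hstep]
      obtain ⟨h1, h2, h3, h4, h5, h6⟩ := ih v q hnd
      refine ⟨h1, ?_, ?_, h4, ?_, h6⟩
      · intro x
        rw [h2]
        constructor
        · rintro (hx | hx)
          · exact Or.inl hx
          · exact Or.inr (List.mem_cons_of_mem _ hx)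
        · rintro (hx | hx)
          · exact Or.inl hx
          · rcases List.mem_cons.mp hx with rfl | hx'
            · exact Or.inl hmem
            · exact Or.inr hx'
      · intro x hx
        rcases h3 x hx with h | h
        · exact Or.inl h
        · exact Or.inr (List.mem_cons_of_mem _ h)
      · intro x hx hxv
        rcases List.mem_cons.mp hx with rfl | hx'
        · exact absurd hmem hxv
        · exact h5 x hx' hxv
    · have hstep : pvStep (v, q) key = (PySem.Set.add v key, q ++ [key]) := by
        simp [pvStep, hmem]
      rw [List.foldl_cons, hstep]
      obtain ⟨h1, h2, h3, h4, h5, h6⟩ := ih (PySem.Set.add v key) (q ++ [key])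
        (PySem.Set.nodup_add v key hnd)
      have hlen : (PySem.Set.add v key).length = v.length + 1 := by
        rw [PySem.Set.add_of_not_mem hmem, List.length_append, List.length_singleton]
      refine ⟨h1, ?_, ?_, ?_, ?_, ?_⟩
      · intro x
        rw [h2, PySem.Set.mem_add]
        constructor
        · rintro ((hx | rfl) | hx)
          · exact Or.inl hx
          · exact Or.inr (List.mem_cons_self ..)
          · exact Or.inr (List.mem_cons_of_mem _ hx)
        · rintro (hx | hx)
          · exact Or.inl (Or.inl hx)
          · rcases List.mem_cons.mp hx with rfl | hx'
            · exact Or.inl (Or.inr rfl)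
            · exact Or.inr hx'
      · intro x hx
        rcases h3 x hx with h | h
        · rcases List.mem_append.mp h with h' | h'
          · exact Or.inl h'
          · rw [List.mem_singleton] at h'
            exact Or.inr (h' ▸ List.mem_cons_self ..)
        · exact Or.inr (List.mem_cons_of_mem _ h)
      · exact (List.prefix_append q [key]).trans h4
      · intro x hx hxv
        by_cases hxk : x = key
        · subst hxk
          exact h4.subset (by simp)
        · rcases List.mem_cons.mp hx with rfl | hx'
          · exact absurd rfl hxk
          · refine h5 x hx' ?_
            rw [PySem.Set.mem_add]
            push Not
            exact ⟨hxv, hxk⟩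
      · rw [List.length_append, List.length_singleton] at h6
        rw [hlen] at h6
        omega

-- A's while loop computes exactly the reachable set
lemma pvBfs_spec (n : Int) (keys : List (List Int)) (graph : PySem.Dict Int (PySem.Set Int))
    (hg : ∀ v : Int, 0 ≤ v → v < n → graph.get? v = some (PySem.Set.ofList (pvF keys v)))
    (hnb : ∀ v : Int, 0 ≤ v → v < n → ∀ k ∈ pvF keys v, 0 ≤ k ∧ k < n) :
    ∀ (fuel : Nat) (visited : PySem.Set Int) (queue : List Int),
      visited.Nodup →
      (∀ v ∈ visited, 0 ≤ v ∧ v < n) →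
      (∀ v ∈ visited, PvReach keys v) →
      ((0:Int) ∈ visited) →
      (∀ x ∈ queue, x ∈ visited) →
      (∀ v ∈ visited, v ∉ queue → ∀ k ∈ pvF keys v, k ∈ visited) →
      (queue.length + (n.toNat - visited.length) ≤ fuel) →
      (pvBfsLoop graph fuel visited queue).Nodup ∧
        ∀ x, (x ∈ pvBfsLoop graph fuel visited queue ↔ PvReach keys x) := by
  intro fuel
  induction fuel with
  | zero =>
    intro visited queue hnd hvr hvReach h0 hq hcl hfuel
    have hq0 : queue = [] := List.eq_nil_of_length_eq_zero (by omega)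
    subst hq0
    refine ⟨hnd, fun x => ⟨fun hx => hvReach x hx, fun hx => ?_⟩⟩
    exact pvReach_subset keys visited h0 (fun v hv k hk => hcl v hv (by simp) k hk) x hx
  | succ fuel ih =>
    intro visited queue hnd hvr hvReach h0 hq hcl hfuel
    cases queue with
    | nil =>
      refine ⟨hnd, fun x => ⟨fun hx => hvReach x hx, fun hx => ?_⟩⟩
      exact pvReach_subset keys visited h0 (fun v hv k hk => hcl v hv (by simp) k hk) x hx
    | cons room queue =>
      have hroomv : room ∈ visited := hq room (List.mem_cons_self ..)
      have hrr := hvr room hroomv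
      have hunfold : pvBfsLoop graph (fuel+1) visited (room :: queue)
          = pvBfsLoop graph fuel
              (((graph.get? room).getD []).foldl pvStep (visited, queue)).1
              (((graph.get? room).getD []).foldl pvStep (visited, queue)).2 := rfl
      rw [hunfold, hg room hrr.1 hrr.2]
      have hLmem : ∀ x : Int, x ∈ ((some (PySem.Set.ofList (pvF keys room))).getD ([]:List Int))
          ↔ x ∈ pvF keys room := by
        intro x
        rw [Option.getD_some]
        exact PySem.Set.mem_ofList _ x
      obtain ⟨h1, h2, h3, h4, h5, h6⟩ :=
        pvInner ((some (PySem.Set.ofList (pvF keys room))).getD ([]:List Int)) visited queue hnd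
      set st := ((some (PySem.Set.ofList (pvF keys room))).getD ([]:List Int)).foldl
        pvStep (visited, queue) with hst
      have hrange' : ∀ v ∈ st.1, 0 ≤ v ∧ v < n := by
        intro v hv
        rcases (h2 v).mp hv with h | h
        · exact hvr v h
        · exact hnb room hrr.1 hrr.2 v ((hLmem v).mp h)
      refine ih st.1 st.2 h1 hrange' ?_ ?_ ?_ ?_ ?_
      · intro v hv
        rcases (h2 v).mp hv with h | h
        · exact hvReach v h
        · exact PvReach.step room v (hvReach room hroomv) ((hLmem v).mp h)
      · exact (h2 0).mpr (Or.inl h0)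
      · intro x hx
        rcases h3 x hx with h | h
        · exact (h2 x).mpr (Or.inl (hq x (List.mem_cons_of_mem _ h)))
        · exact (h2 x).mpr (Or.inr h)
      · intro v hv hvq k hk
        by_cases hvvis : v ∈ visited
        · by_cases hvroom : v = room
          · subst hvroom
            exact (h2 k).mpr (Or.inr ((hLmem k).mpr hk))
          · have hnin : v ∉ room :: queue := by
              intro hmem'
              rcases List.mem_cons.mp hmem' with h' | h'
              · exact hvroom h'
              · exact hvq (h4.subset h')
            exact (h2 k).mpr (Or.inl (hcl v hvvis hnin k hk))
        · have hvL : v ∈ ((some (PySem.Set.ofList (pvF keys room))).getD ([]:List Int)) :=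
            ((h2 v).mp hv).resolve_left hvvis
          exact absurd (h5 v hvL hvvis) hvq
      · have hst1le : st.1.length ≤ n.toNat := pvLen_le n st.1 h1 hrange'
        have hvle : visited.length ≤ n.toNat := pvLen_le n visited hnd hvr
        have hqle : queue.length ≤ st.2.length := h4.length_le
        rw [List.length_cons] at hfuel
        omega

-- ---- B side ----

-- getD after set, spelt out
lemma pvGetDSet (l : List Bool) (i j : Nat) (a : Bool) :
    (l.set i a).getD j false = if i = j ∧ i < l.length then a else l.getD j false := by
  rw [List.getD_eq_getElem?_getD, List.getD_eq_getElem?_getD, List.getElem?_set]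
  by_cases hij : i = j
  · subst hij
    by_cases hl : i < l.length
    · rw [if_pos rfl, if_pos hl, if_pos ⟨rfl, hl⟩, Option.getD_some]
    · rw [if_pos rfl, if_neg hl, if_neg (by tauto), Option.getD_none,
        List.getElem?_eq_none (by omega), Option.getD_none]
  · rw [if_neg hij, if_neg (by tauto)]

-- setting a False entry to True increments the count of Trues
lemma pvCountSet : ∀ (l : List Bool) (i : Nat), i < l.length → l.getD i false = false →
    (l.set i true).count true = l.count true + 1 := by
  intro l
  induction l with
  | nil => intro i h; simp at h
  | cons b t ih =>
    intro i hi hb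
    cases i with
    | zero =>
      simp only [List.getD_cons_zero] at hb
      subst hb
      simp
    | succ i =>
      simp only [List.getD_cons_succ] at hb
      have := ih i (by simpa using hi) hb
      simp [List.count_cons, this]
      omega

-- the count of Trues is the number of indices holding True
lemma pvCountIdx : ∀ l : List Bool,
    l.count true = ((List.range l.length).filter (fun i => l.getD i false)).length := by
  intro l
  induction l with
  | nil => simp
  | cons b t ih =>
    rw [List.length_cons, List.range_succ_eq_map, List.filter_cons, List.filter_map]
    have hcomp : ((fun i => (b :: t).getD i false) ∘ Nat.succ) = (fun i => t.getD i false) := by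
      funext i
      simp [Function.comp]
    rw [hcomp]
    cases b <;> simp [ih]

-- the inner 'for k in keys[room]' fold of B
lemma pvInnerAlt (ks : List Int) :
    ∀ (r : List Bool) (c : Bool),
      (∀ k ∈ ks, 0 ≤ k ∧ k.toNat < r.length) →
      (ks.foldl pvInnerStep (r, c)).1.length = r.length ∧
      (∀ i, r.getD i false = true → (ks.foldl pvInnerStep (r, c)).1.getD i false = true) ∧
      (∀ i, (ks.foldl pvInnerStep (r, c)).1.getD i false = true →
        r.getD i false = true ∨ ∃ k ∈ ks, k.toNat = i) ∧
      (∀ k ∈ ks, (ks.foldl pvInnerStep (r, c)).1.getD k.toNat false = true) ∧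
      (r.count true ≤ (ks.foldl pvInnerStep (r, c)).1.count true) ∧
      ((ks.foldl pvInnerStep (r, c)).2 = false →
        (ks.foldl pvInnerStep (r, c)).1 = r ∧ c = false ∧ ∀ k ∈ ks, r.getD k.toNat false = true) ∧
      (c = false → (ks.foldl pvInnerStep (r, c)).2 = true →
        r.count true < (ks.foldl pvInnerStep (r, c)).1.count true) := by
  induction ks with
  | nil =>
    intro r c _
    refine ⟨rfl, fun i h => h, fun i h => Or.inl h, by simp, le_refl _, ?_, ?_⟩
    · intro hc
      exact ⟨rfl, hc, by simp⟩
    · intro hc hc'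
      simp only [List.foldl_nil] at hc'
      rw [hc] at hc'
      exact absurd hc' (by simp)
  | cons k ks ih =>
    intro r c hrange
    have hk := hrange k (List.mem_cons_self ..)
    have hkcast : k = ((k.toNat : Nat) : Int) := by omega
    have hread : PySem.List.pyGetD r k false = r.getD k.toNat false := by
      conv_lhs => rw [hkcast]
      exact PySem.List.pyGetD_natCast r k.toNat false
    by_cases hb : r.getD k.toNat false = true
    · have hstep : pvInnerStep (r, c) k = (r, c) := by
        show (if PySem.List.pyGetD r k false = true then (r, c)
          else (PySem.List.pySetD r k true, true)) = (r, c)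
        rw [hread, hb]
        rfl
      rw [List.foldl_cons, hstep]
      obtain ⟨h1, h2, h3, h4, h5, h6, h7⟩ := ih r c
        (fun k' hk' => hrange k' (List.mem_cons_of_mem _ hk'))
      refine ⟨h1, h2, ?_, ?_, h5, ?_, h7⟩
      · intro i hi
        rcases h3 i hi with h | ⟨k', hk', hkk⟩
        · exact Or.inl h
        · exact Or.inr ⟨k', List.mem_cons_of_mem _ hk', hkk⟩
      · intro k' hk'
        rcases List.mem_cons.mp hk' with rfl | hk''
        · exact h2 _ hb
        · exact h4 k' hk''
      · intro hfl
        obtain ⟨ha, hb', hcl⟩ := h6 hfl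
        refine ⟨ha, hb', ?_⟩
        intro k' hk'
        rcases List.mem_cons.mp hk' with rfl | hk''
        · exact hb
        · exact hcl k' hk''
    · have hb' : r.getD k.toNat false = false := by
        cases h : r.getD k.toNat false
        · rfl
        · exact absurd h hb
      have hwrite : PySem.List.pySetD r k true = r.set k.toNat true := by
        conv_lhs => rw [hkcast]
        exact PySem.List.pySetD_natCast r k.toNat true
      have hstep : pvInnerStep (r, c) k = (r.set k.toNat true, true) := by
        show (if PySem.List.pyGetD r k false = true then (r, c)
          else (PySem.List.pySetD r k true, true)) = (r.set k.toNat true, true)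
        rw [hread, hb', hwrite]
        rfl
      rw [List.foldl_cons, hstep]
      have hlen' : (r.set k.toNat true).length = r.length := List.length_set ..
      obtain ⟨h1, h2, h3, h4, h5, h6, h7⟩ := ih (r.set k.toNat true) true
        (fun k' hk' => by
          have := hrange k' (List.mem_cons_of_mem _ hk')
          omega)
      have hmono : ∀ i, r.getD i false = true → (r.set k.toNat true).getD i false = true := by
        intro i hi
        rw [pvGetDSet]
        by_cases h : k.toNat = i ∧ k.toNat < r.length
        · rw [if_pos h]
        · rw [if_neg h]; exact hi
      have hself : (r.set k.toNat true).getD k.toNat false = true := by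
        rw [pvGetDSet, if_pos ⟨rfl, hk.2⟩]
      have hcnt : (r.set k.toNat true).count true = r.count true + 1 :=
        pvCountSet r k.toNat hk.2 hb'
      refine ⟨by rw [h1, hlen'], ?_, ?_, ?_, ?_, ?_, ?_⟩
      · intro i hi
        exact h2 i (hmono i hi)
      · intro i hi
        rcases h3 i hi with h | ⟨k', hk', hkk⟩
        · rw [pvGetDSet] at h
          by_cases hc : k.toNat = i ∧ k.toNat < r.length
          · exact Or.inr ⟨k, List.mem_cons_self .., hc.1⟩
          · rw [if_neg hc] at h
            exact Or.inl h
        · exact Or.inr ⟨k', List.mem_cons_of_mem _ hk', hkk⟩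
      · intro k' hk'
        rcases List.mem_cons.mp hk' with rfl | hk''
        · exact h2 _ hself
        · exact h4 k' hk''
      · omega
      · intro hfl
        obtain ⟨-, hb'', -⟩ := h6 hfl
        exact absurd hb'' (by simp)
      · intro _ _
        omega

-- one full 'for room in range(n)' sweep of B
lemma pvSweepAlt (n : Int) (keys : List (List Int)) (graph : List (List Int))
    (hnb : ∀ v : Int, 0 ≤ v → v < n → ∀ k ∈ pvF keys v, 0 ≤ k ∧ k < n)
    (hgr : ∀ v : Int, 0 ≤ v → v < n → PySem.List.pyGetD graph v [] = pvF keys v) :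
    ∀ (R : List Int) (r : List Bool) (c : Bool),
      r.length = n.toNat →
      (∀ v ∈ R, 0 ≤ v ∧ v < n) →
      (R.foldl (pvSweepStep graph) (r, c)).1.length = n.toNat ∧
      (∀ i, r.getD i false = true → (R.foldl (pvSweepStep graph) (r, c)).1.getD i false = true) ∧
      ((∀ i, r.getD i false = true → PvReach keys (i:Int)) →
        ∀ i, (R.foldl (pvSweepStep graph) (r, c)).1.getD i false = true → PvReach keys (i:Int)) ∧
      (r.count true ≤ (R.foldl (pvSweepStep graph) (r, c)).1.count true) ∧
      ((R.foldl (pvSweepStep graph) (r, c)).2 = false →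
        (R.foldl (pvSweepStep graph) (r, c)).1 = r ∧ c = false ∧
        ∀ v ∈ R, r.getD v.toNat false = true → ∀ k ∈ pvF keys v, r.getD k.toNat false = true) ∧
      (c = false → (R.foldl (pvSweepStep graph) (r, c)).2 = true →
        r.count true < (R.foldl (pvSweepStep graph) (r, c)).1.count true) := by
  intro R
  induction R with
  | nil =>
    intro r c hlen _
    refine ⟨hlen, fun i h => h, fun hs => hs, le_refl _, ?_, ?_⟩
    · intro hc
      exact ⟨rfl, hc, by simp⟩
    · intro hc hc'
      simp only [List.foldl_nil] at hc'
      rw [hc] at hc'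
      exact absurd hc' (by simp)
  | cons room R ih =>
    intro r c hlen hR
    have hroom := hR room (List.mem_cons_self ..)
    have hroomcast : room = ((room.toNat : Nat) : Int) := by omega
    have hread : PySem.List.pyGetD r room false = r.getD room.toNat false := by
      conv_lhs => rw [hroomcast]
      exact PySem.List.pyGetD_natCast r room.toNat false
    by_cases hb : r.getD room.toNat false = true
    · -- reachable[room] is True: run the inner fold over keys[room]
      have hstep : pvSweepStep graph (r, c) room
          = (pvF keys room).foldl pvInnerStep (r, c) := by
        show (if PySem.List.pyGetD r room false = true then
            (PySem.List.pyGetD graph room []).foldl pvInnerStep (r, c)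
          else (r, c)) = (pvF keys room).foldl pvInnerStep (r, c)
        rw [hread, hb, hgr room hroom.1 hroom.2]
        rfl
      rw [List.foldl_cons, hstep]
      obtain ⟨i1, i2, i3, i4, i5, i6, i7⟩ := pvInnerAlt (pvF keys room) r c
        (fun k hk => by
          have := hnb room hroom.1 hroom.2 k hk
          omega)
      set st1 := (pvF keys room).foldl pvInnerStep (r, c) with hst1
      obtain ⟨o1, o2, o3, o4, o5, o6⟩ := ih st1.1 st1.2 (by rw [i1, hlen])
        (fun v hv => hR v (List.mem_cons_of_mem _ hv))
      have hfold : R.foldl (pvSweepStep graph) (st1.1, st1.2) = R.foldl (pvSweepStep graph) st1 := by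
        rfl
      rw [hfold] at o1 o2 o3 o4 o5 o6
      refine ⟨o1, ?_, ?_, ?_, ?_, ?_⟩
      · intro i hi
        exact o2 i (i2 i hi)
      · intro hs i hi
        have hroomreach : PvReach keys room := by
          have := hs room.toNat hb
          rwa [← hroomcast] at this
        refine o3 ?_ i hi
        intro j hj
        rcases i3 j hj with h | ⟨k, hk, hkk⟩
        · exact hs j h
        · have hk0 : 0 ≤ k := (hnb room hroom.1 hroom.2 k hk).1
          have hcast : ((k.toNat : Nat) : Int) = k := by omega
          rw [hkk] at hcast
          rw [hcast]
          exact PvReach.step room k hroomreach hk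
      · omega
      · intro hfl
        obtain ⟨ha, hb1, hcl⟩ := o5 hfl
        obtain ⟨hi1, hi2, hi3⟩ := i6 hb1
        refine ⟨by rw [ha, hi1], hi2, ?_⟩
        intro v hv hvtrue k hk
        rcases List.mem_cons.mp hv with rfl | hv'
        · exact hi3 k hk
        · have := hcl v hv'
          rw [hi1] at this
          exact this hvtrue k hk
      · intro hc hfl
        cases h1 : st1.2 with
        | true =>
          have := i7 hc h1
          omega
        | false =>
          obtain ⟨hi1, -, -⟩ := i6 h1
          have := o6 h1 hfl
          rw [hi1] at this
          exact this
    · have hb' : r.getD room.toNat false = false := by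
        cases h : r.getD room.toNat false
        · rfl
        · exact absurd h hb
      have hstep : pvSweepStep graph (r, c) room = (r, c) := by
        show (if PySem.List.pyGetD r room false = true then
            (PySem.List.pyGetD graph room []).foldl pvInnerStep (r, c)
          else (r, c)) = (r, c)
        rw [hread, hb']
        rfl
      rw [List.foldl_cons, hstep]
      obtain ⟨o1, o2, o3, o4, o5, o6⟩ := ih r c hlen
        (fun v hv => hR v (List.mem_cons_of_mem _ hv))
      refine ⟨o1, o2, o3, o4, ?_, o6⟩
      intro hfl
      obtain ⟨ha, hb1, hcl⟩ := o5 hfl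
      refine ⟨ha, hb1, ?_⟩
      intro v hv hvtrue k hk
      rcases List.mem_cons.mp hv with rfl | hv'
      · exact absurd hvtrue hb
      · exact hcl v hv' hvtrue k hk

-- B's 'while changed' loop marks exactly the reachable rooms
lemma pvSaturate_spec (n : Int) (keys : List (List Int)) (graph : List (List Int)) (h1n : 1 ≤ n)
    (hnb : ∀ v : Int, 0 ≤ v → v < n → ∀ k ∈ pvF keys v, 0 ≤ k ∧ k < n)
    (hgr : ∀ v : Int, 0 ≤ v → v < n → PySem.List.pyGetD graph v [] = pvF keys v) :
    ∀ (fuel : Nat) (r : List Bool),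
      r.length = n.toNat →
      r.getD 0 false = true →
      (∀ i, r.getD i false = true → PvReach keys (i:Int)) →
      n.toNat ≤ r.count true + fuel →
      (pvSaturate n graph fuel r).length = n.toNat ∧
      ∀ i, ((pvSaturate n graph fuel r).getD i false = true ↔ i < n.toNat ∧ PvReach keys (i:Int)) := by
  intro fuel
  induction fuel with
  | zero =>
    intro r hlen h0 hs hcnt
    simp only [pvSaturate]
    have hle : r.count true ≤ r.length := List.count_le_length
    have hall : ∀ b ∈ r, true = b := List.count_eq_length.mp (by omega)
    refine ⟨hlen, fun i => ⟨?_, ?_⟩⟩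
    · intro hi
      have hilt : i < n.toNat := by
        by_contra hge
        rw [List.getD_eq_getElem?_getD, List.getElem?_eq_none (by omega)] at hi
        simp at hi
      exact ⟨hilt, hs i hi⟩
    · rintro ⟨hilt, -⟩
      have : r[i] = true := (hall r[i] (List.getElem_mem (by omega))).symm
      rw [List.getD_eq_getElem?_getD, List.getElem?_eq_getElem (by omega), Option.getD_some, this]
  | succ fuel ih =>
    intro r hlen h0 hs hcnt
    have hRmem : ∀ v ∈ PySem.List.pyRange 0 n 1, 0 ≤ v ∧ v < n := by
      intro v hv
      rw [PySem.List.mem_pyRange_one] at hv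
      exact hv
    obtain ⟨s1, s2, s3, s4, s5, s6⟩ := pvSweepAlt n keys graph hnb hgr (PySem.List.pyRange 0 n 1) r false hlen hRmem
    have hunfold : pvSaturate n graph (fuel+1) r
        = if ((PySem.List.pyRange 0 n 1).foldl (pvSweepStep graph) (r, false)).2 then
            pvSaturate n graph fuel ((PySem.List.pyRange 0 n 1).foldl (pvSweepStep graph) (r, false)).1
          else ((PySem.List.pyRange 0 n 1).foldl (pvSweepStep graph) (r, false)).1 := rfl
    cases hfl : ((PySem.List.pyRange 0 n 1).foldl (pvSweepStep graph) (r, false)).2 with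
    | true =>
      rw [hunfold, hfl, if_pos rfl]
      have hlt := s6 rfl hfl
      exact ih _ s1 (s2 0 h0) (s3 hs) (by omega)
    | false =>
      obtain ⟨ha, -, hcl⟩ := s5 hfl
      rw [hunfold, hfl, if_neg (by simp), ha]
      -- r is a fixed point: closed under the edges, hence contains all of PvReach
      have hclosed : ∀ x, PvReach keys x → r.getD x.toNat false = true := by
        intro x hx
        induction hx with
        | zero => exact h0
        | step v k hv hk ihv =>
          have hvr := pvReach_range n keys h1n hnb v hv
          have hvmem : v ∈ PySem.List.pyRange 0 n 1 := by
            rw [PySem.List.mem_pyRange_one]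
            exact hvr
          exact hcl v hvmem ihv k hk
      refine ⟨hlen, fun i => ⟨?_, ?_⟩⟩
      · intro hi
        have hilt : i < n.toNat := by
          by_contra hge
          rw [List.getD_eq_getElem?_getD, List.getElem?_eq_none (by omega)] at hi
          simp at hi
        exact ⟨hilt, hs i hi⟩
      · rintro ⟨hilt, hre⟩
        have := hclosed (i:Int) hre
        rwa [Int.toNat_natCast] at this

-- ===== VERDICT (by name: the statement is the Claim_ definition above) =====
theorem find_unreachable_rooms_spec : Claim_equal_find_unreachable_rooms := by
  intro n keys _ hpre
  show find_unreachable_rooms n keys = find_unreachable_rooms_alt n keys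
  have hnb := pvF_range n keys hpre
  obtain ⟨hn, hlen, -⟩ := hpre
  simp only [find_unreachable_rooms, find_unreachable_rooms_alt]
  -- ---- A computes the reachable set as a nodup list ----
  have hrange : PySem.List.pyRange 0 n 1 = List.map (Nat.cast : Nat → Int) (List.range n.toNat) := by
    rw [show n = ((n.toNat : Nat) : Int) by omega]
    exact PySem.List.pyRange_zero_natCast n.toNat
  have hg : ∀ v : Int, 0 ≤ v → v < n →
      ((PySem.List.pyRange 0 n 1).foldl
        (fun d i => d.insert i (PySem.Set.ofList ((PySem.List.pyGet? keys i).getD [])))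
        PySem.Dict.empty).get? v = some (PySem.Set.ofList (pvF keys v)) := by
    intro v h0 h1
    rw [hrange, pvGraph_get (fun i => PySem.Set.ofList ((PySem.List.pyGet? keys i).getD []))
      n.toNat PySem.Dict.empty v, if_pos (by constructor <;> omega)]
    rfl
  have hA := pvBfs_spec n keys _ hg hnb n.toNat (PySem.Set.ofList [0]) [0]
    (PySem.Set.nodup_ofList [0])
    (by intro v hv
        rw [PySem.Set.mem_ofList, List.mem_singleton] at hv
        exact ⟨by omega, by omega⟩)
    (by intro v hv
        rw [PySem.Set.mem_ofList, List.mem_singleton] at hv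
        exact hv ▸ PvReach.zero)
    ((PySem.Set.mem_ofList [0] 0).mpr (List.mem_singleton.mpr rfl))
    (by intro x hx
        exact (PySem.Set.mem_ofList [0] x).mpr hx)
    (by intro v hv hvq
        rw [PySem.Set.mem_ofList, List.mem_singleton] at hv
        exact absurd (List.mem_singleton.mpr hv) hvq)
    (by rw [show PySem.Set.ofList [(0:Int)] = [0] from rfl]
        simp only [List.length_cons, List.length_nil]
        omega)
  obtain ⟨hA1, hA2⟩ := hA
  -- ---- B's initial table ----
  have hr0 : PySem.List.pySetD (List.replicate n.toNat false) 0 true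
      = (List.replicate n.toNat false).set 0 true := by
    rw [show (0:Int) = ((0:Nat):Int) from rfl]
    exact PySem.List.pySetD_natCast _ 0 true
  have hr0len : (PySem.List.pySetD (List.replicate n.toNat false) 0 true).length = n.toNat := by
    rw [hr0, List.length_set, List.length_replicate]
  have hr0get : ∀ i, (PySem.List.pySetD (List.replicate n.toNat false) 0 true).getD i false
      = if i = 0 ∧ 0 < n.toNat then true else false := by
    intro i
    rw [hr0, pvGetDSet, List.length_replicate]
    by_cases h : (0:Nat) = i ∧ 0 < n.toNat
    · rw [if_pos h, if_pos ⟨h.1.symm, h.2⟩]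
    · rw [if_neg h, if_neg (by tauto), List.getD_eq_getElem?_getD]
      by_cases hi : i < n.toNat
      · rw [List.getElem?_eq_getElem (by simpa using hi)]
        simp
      · rw [List.getElem?_eq_none (by simpa using hi)]
        simp
  have hgr : ∀ v : Int, 0 ≤ v → v < n →
      PySem.List.pyGetD ((PySem.List.pyRange 0 n 1).map
        (fun i => (PySem.List.pyGet? keys i).getD [])) v [] = pvF keys v := by
    intro v h0 h1
    exact PySem.List.pyGetD_map_pyRange_of_nonneg _ n v [] h0 h1
  have hB := pvSaturate_spec n keys
    ((PySem.List.pyRange 0 n 1).map (fun i => (PySem.List.pyGet? keys i).getD []))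
    hn hnb hgr n.toNat
    (PySem.List.pySetD (List.replicate n.toNat false) 0 true) hr0len
    (by rw [hr0get]; rw [if_pos ⟨rfl, by omega⟩])
    (by intro i hi
        rw [hr0get] at hi
        by_cases h : i = 0 ∧ 0 < n.toNat
        · rw [h.1]
          exact PvReach.zero
        · rw [if_neg h] at hi
          exact absurd hi (by simp))
    (by omega)
  obtain ⟨hB1, hB2⟩ := hB
  set f := pvSaturate n
    ((PySem.List.pyRange 0 n 1).map (fun i => (PySem.List.pyGet? keys i).getD []))
    n.toNat (PySem.List.pySetD (List.replicate n.toNat false) 0 true) with hfdef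
  -- ---- bridge: |visited| = count of Trues in f ----
  set L : List Int := ((List.range n.toNat).filter (fun i => f.getD i false)).map
    (Nat.cast : Nat → Int) with hLdef
  have hLnodup : L.Nodup := by
    exact ((List.nodup_range).filter _).map (fun a b h => by exact_mod_cast h)
  have hLmem : ∀ x : Int, x ∈ L ↔ PvReach keys x := by
    intro x
    rw [hLdef, List.mem_map]
    constructor
    · rintro ⟨i, hi, rfl⟩
      rw [List.mem_filter] at hi
      exact ((hB2 i).mp hi.2).2
    · intro hx
      have hxr := pvReach_range n keys hn hnb x hx
      refine ⟨x.toNat, ?_, by omega⟩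
      rw [List.mem_filter, List.mem_range]
      have : ((x.toNat : Nat) : Int) = x := by omega
      refine ⟨by omega, (hB2 x.toNat).mpr ⟨by omega, by rwa [this]⟩⟩
  have hperm := (List.perm_ext_iff_of_nodup hA1 hLnodup).mpr
    (fun a => (hA2 a).trans ((hLmem a).symm))
  have hlenL : (pvBfsLoop _ n.toNat (PySem.Set.ofList [0]) [0]).length = L.length := hperm.length_eq
  have hcount : f.count true = L.length := by
    rw [hLdef, List.length_map, pvCountIdx f, hB1]
  rw [hlenL, hcount]
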